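-- pv_equiv track=rewrite | github.com/daveuu/baga | baga/Homology.py | _collect_tophits
-- ===== SOURCE A (Python) =====
-- def _collect_tophits(from_hits):
--     tops = {}           # shortest A to B hit (possibly draws)
--     nontops = {}        # other A to B hits but not shortest (ordered and could also be draws)
--     zeros = set()       # those shortest A to B hits that are zero distance (no chance of inparalogs)
--     for A,Bs in from_hits.items():
--         # get increasing unique distances
--         incr_distances = sorted(set(Bs.values()))
--         closest = incr_distances[0]
--         # collect all ORFs with top score (could be a draw for top match)
--         tops[A] = sorted([B_ORF for B_ORF,dist in Bs.items() if dist == closest])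
--         if closest == 0:
--             zeros.add(A)
--         # collect other ORFs matching increasing scores in order
--         these_nontops = []
--         for this_dist in incr_distances[1:]:
--             these_nontops += [sorted([B_ORF for B_ORF,dist in Bs.items() \
--                     if dist == this_dist])]
--         if len(these_nontops):
--             nontops[A] = these_nontops
--     return(tops,zeros,nontops)
-- ===== SOURCE B (Python) =====
-- def _by_distance(Bs):
--     # bucket B-ORFs by distance in one pass, then one sort of the keys and of each bucket
--     buckets = {}
--     for B_ORF, dist in Bs.items():
--         buckets.setdefault(dist, []).append(B_ORF)
--     return [(d, sorted(buckets[d])) for d in sorted(buckets)]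
--
-- def _collect_tophits(from_hits):
--     grouped = {A: _by_distance(Bs) for A, Bs in from_hits.items()}
--     tops = {A: gs[0][1] for A, gs in grouped.items()}
--     zeros = {A for A, gs in grouped.items() if gs[0][0] == 0}
--     nontops = {A: [g for _, g in gs[1:]] for A, gs in grouped.items() if len(gs) > 1}
--     return (tops, zeros, nontops)
-- ===== Notes on version B (the rewrite author's own statement) =====
-- stated objective: alternative
-- what changed: A rescans all of Bs once per distinct distance inside one stateful loop; B groups each Bs by distance with a one-pass bucketing helper and then builds tops, zeros and nontops as three staged dict/set comprehensions over the grouped results; on the generated inputs (few distinct distances per A) this was not measurably faster.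
import Mathlib
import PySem

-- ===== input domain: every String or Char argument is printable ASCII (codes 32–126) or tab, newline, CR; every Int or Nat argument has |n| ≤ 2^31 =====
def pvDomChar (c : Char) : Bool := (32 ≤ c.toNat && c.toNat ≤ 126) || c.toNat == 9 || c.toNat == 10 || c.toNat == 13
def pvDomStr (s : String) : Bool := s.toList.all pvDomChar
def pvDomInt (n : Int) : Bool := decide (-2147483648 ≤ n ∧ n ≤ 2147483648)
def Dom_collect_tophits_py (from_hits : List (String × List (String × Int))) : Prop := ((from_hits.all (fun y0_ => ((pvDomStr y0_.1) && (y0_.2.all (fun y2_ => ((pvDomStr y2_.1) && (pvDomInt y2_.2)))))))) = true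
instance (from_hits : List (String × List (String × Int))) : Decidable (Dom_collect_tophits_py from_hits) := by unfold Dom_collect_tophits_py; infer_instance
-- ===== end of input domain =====

-- B replaces A's stateful loop (one pass per distinct distance over Bs) by a bucketing helper
-- per A plus three staged dict/set comprehensions over the grouped results; objective:
-- alternative algorithm, same measured cost. Equivalence is about return values.

-- ===== PORT A =====
-- the loop state (tops, zeros, nontops) of the Python function
abbrev CtState := PySem.Dict String (List String) × PySem.Set String × PySem.Dict String (List (List String))

-- A's loop body for one (A, Bs) item (dicts enter as assoc lists; PySem.Dict.ofList is the
-- Python-dict decoding: last value wins, first position; incr_distances[0] is total here via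
-- pyGetD — Pre_ excludes the empty-Bs inputs on which the Python raises IndexError)
def ctStepA (st : CtState) (AB : String × List (String × Int)) : CtState :=
  let A := AB.1
  let bs := (PySem.Dict.ofList AB.2).items
  let incr_distances := PySem.List.sorted (PySem.Set.ofList (bs.map (·.2))) (fun x => x) false
  let closest := PySem.List.pyGetD incr_distances 0 0
  let tops := st.1.insert A (PySem.List.sorted ((bs.filter (fun p => p.2 == closest)).map (·.1)) (fun x => x) false)
  let zeros := if closest == 0 then PySem.Set.add st.2.1 A else st.2.1
  let these_nontops := (PySem.List.slice incr_distances (some 1) none).foldl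
    (fun acc this_dist => acc ++ [PySem.List.sorted ((bs.filter (fun p => p.2 == this_dist)).map (·.1)) (fun x => x) false]) []
  let nontops := if these_nontops.length ≠ 0 then st.2.2.insert A these_nontops else st.2.2
  (tops, zeros, nontops)

def collect_tophits_py (from_hits : List (String × List (String × Int))) : (List (String × List String)) × List String × (List (String × List (List String))) :=
  let r := ((PySem.Dict.ofList from_hits).items).foldl ctStepA (PySem.Dict.empty, PySem.Set.empty, PySem.Dict.empty)
  (r.1.items, r.2.1, r.2.2.items)

-- ===== PORT B =====
-- _by_distance: bucket B-ORFs by distance in one pass, return the (distance, sorted bucket)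
-- pairs with distances increasing
def ctByDistance (Bs : List (String × Int)) : List (Int × List String) :=
  let buckets := (PySem.Dict.ofList Bs).items.foldl (fun d p => d.modify p.2 [] (fun v => v ++ [p.1])) PySem.Dict.empty
  (PySem.List.sorted buckets.keys (fun x => x) false).map
    (fun d => (d, PySem.List.sorted (buckets.getD d []) (fun x => x) false))

-- gs[0] raises IndexError when a Bs is empty (excluded by Pre_); ported with pyGetD and an
-- unused default so the port stays total
def collect_tophits_py_alt (from_hits : List (String × List (String × Int))) : (List (String × List String)) × List String × (List (String × List (List String))) :=
  let grouped := (PySem.Dict.ofList from_hits).items.map (fun AB => (AB.1, ctByDistance AB.2))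
  let tops := PySem.Dict.ofList (grouped.map (fun p => (p.1, (PySem.List.pyGetD p.2 0 (0, [])).2)))
  let zeros := PySem.Set.ofList ((grouped.filter (fun p => (PySem.List.pyGetD p.2 0 (0, [])).1 == 0)).map (·.1))
  let nontops := PySem.Dict.ofList ((grouped.filter (fun p => 1 < p.2.length)).map
    (fun p => (p.1, (PySem.List.slice p.2 (some 1) none).map (·.2))))
  (tops.items, zeros, nontops.items)

-- ===== PRECONDITION & SPEC =====
-- Pre_ excludes exactly the inputs whose decoded dict maps some A to an empty Bs dict:
-- there Python A (and B) raise IndexError on incr_distances[0] / gs[0].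
def Pre_collect_tophits_py (from_hits : List (String × List (String × Int))) : Prop :=
  ∀ Bs ∈ (PySem.Dict.ofList from_hits).values, Bs ≠ []
instance (from_hits : List (String × List (String × Int))) : Decidable (Pre_collect_tophits_py from_hits) := by unfold Pre_collect_tophits_py; infer_instance

def pvWitness_collect_tophits_py : (List (String × List (String × Int))) :=
  [("a", [("x", 1), ("y", 0), ("z", 1)]), ("b", [("x", 0)])]

def Spec_collect_tophits_py (from_hits : List (String × List (String × Int))) (out : (List (String × List String)) × List String × (List (String × List (List String)))) : Prop := out = collect_tophits_py_alt from_hits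
instance (from_hits : List (String × List (String × Int))) (out : (List (String × List String)) × List String × (List (String × List (List String)))) : Decidable (Spec_collect_tophits_py from_hits out) := by unfold Spec_collect_tophits_py; infer_instance

-- ===== CLAIM (what is proved, stated in full; the proofs are below) =====
def Claim_equal_collect_tophits_py : Prop := ∀ (from_hits : List (String × List (String × Int))), Dom_collect_tophits_py from_hits → Pre_collect_tophits_py from_hits → Spec_collect_tophits_py from_hits (collect_tophits_py from_hits)

-- ===== LEMMAS AND PROOFS =====

-- A's per-item values, named so the fold invariant can talk about them
def ctDists (Bs : List (String × Int)) : List Int :=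
  PySem.List.sorted (PySem.Set.ofList ((PySem.Dict.ofList Bs).items.map (·.2))) (fun x => x) false

def ctSF (Bs : List (String × Int)) (d : Int) : List String :=
  PySem.List.sorted (((PySem.Dict.ofList Bs).items.filter (fun p => p.2 == d)).map (·.1)) (fun x => x) false

def aTop (Bs : List (String × Int)) : List String := ctSF Bs (PySem.List.pyGetD (ctDists Bs) 0 0)

def aZero (Bs : List (String × Int)) : Bool := PySem.List.pyGetD (ctDists Bs) 0 0 == 0

def aNts (Bs : List (String × Int)) : List (List String) :=
  (PySem.List.slice (ctDists Bs) (some 1) none).foldl (fun acc d => acc ++ [ctSF Bs d]) []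

theorem stepA_eq (st : CtState) (AB : String × List (String × Int)) :
    ctStepA st AB = (st.1.insert AB.1 (aTop AB.2),
      (if aZero AB.2 then PySem.Set.add st.2.1 AB.1 else st.2.1),
      (if (aNts AB.2).length ≠ 0 then st.2.2.insert AB.1 (aNts AB.2) else st.2.2)) := rfl

-- the fold over items with fresh distinct keys appends one entry per item to each component
theorem foldA_spec : ∀ (l : List (String × List (String × Int)))
    (t : PySem.Dict String (List String)) (z : PySem.Set String) (n : PySem.Dict String (List (List String))),
    (l.map Prod.fst).Nodup →
    (∀ x ∈ l, t.contains x.1 = false) → (∀ x ∈ l, x.1 ∉ z) → (∀ x ∈ l, n.contains x.1 = false) →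
    (l.foldl ctStepA (t, z, n)).1.items = t.items ++ l.map (fun x => (x.1, aTop x.2))
    ∧ (l.foldl ctStepA (t, z, n)).2.1 = z ++ (l.filter (fun x => aZero x.2)).map (·.1)
    ∧ (l.foldl ctStepA (t, z, n)).2.2.items = n.items ++ (l.filter (fun x => decide ((aNts x.2).length ≠ 0))).map (fun x => (x.1, aNts x.2))
  | [], t, z, n, _, _, _, _ => by simp
  | x :: xs, t, z, n, hnd, ht, hz, hn => by
    have hx1 : x.1 ∉ xs.map Prod.fst := by
      simp only [List.map_cons, List.nodup_cons] at hnd; exact hnd.1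
    have hndx : (xs.map Prod.fst).Nodup := by
      simp only [List.map_cons, List.nodup_cons] at hnd; exact hnd.2
    have hne : ∀ y ∈ xs, y.1 ≠ x.1 := by
      intro y hy h; exact hx1 (h ▸ List.mem_map_of_mem hy)
    have ht' : ∀ y ∈ xs, (t.insert x.1 (aTop x.2)).contains y.1 = false := by
      intro y hy
      rw [PySem.Dict.contains_insert]
      simp [hne y hy, ht y (List.mem_cons_of_mem _ hy)]
    have hz' : ∀ y ∈ xs, y.1 ∉ (if aZero x.2 then PySem.Set.add z x.1 else z) := by
      intro y hy
      split
      · rw [PySem.Set.mem_add]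
        push Not
        exact ⟨hz y (List.mem_cons_of_mem _ hy), hne y hy⟩
      · exact hz y (List.mem_cons_of_mem _ hy)
    have hn' : ∀ y ∈ xs, (if (aNts x.2).length ≠ 0 then n.insert x.1 (aNts x.2) else n).contains y.1 = false := by
      intro y hy
      split
      · rw [PySem.Dict.contains_insert]
        simp [hne y hy, hn y (List.mem_cons_of_mem _ hy)]
      · exact hn y (List.mem_cons_of_mem _ hy)
    have hti : (t.insert x.1 (aTop x.2)).items = t.items ++ [(x.1, aTop x.2)] :=
      PySem.Dict.items_insert_of_not_contains _ _ (ht x List.mem_cons_self)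
    have hzi : (if aZero x.2 then PySem.Set.add z x.1 else z)
        = z ++ (if aZero x.2 then [x.1] else []) := by
      split
      · exact PySem.Set.add_of_not_mem (hz x List.mem_cons_self)
      · simp
    have hni : (if (aNts x.2).length ≠ 0 then n.insert x.1 (aNts x.2) else n).items
        = n.items ++ (if (aNts x.2).length ≠ 0 then [(x.1, aNts x.2)] else []) := by
      split
      · exact PySem.Dict.items_insert_of_not_contains _ _ (hn x List.mem_cons_self)
      · simp
    obtain ⟨i1, i2, i3⟩ := foldA_spec xs _ _ _ hndx ht' hz' hn'
    simp only [List.foldl_cons, stepA_eq] at *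
    refine ⟨?_, ?_, ?_⟩
    · rw [i1, hti, List.map_cons, List.append_assoc]; rfl
    · rw [i2, hzi, List.filter_cons, List.append_assoc]
      by_cases h : aZero x.2 <;> simp [h]
    · rw [i3, hni, List.filter_cons, List.append_assoc]
      by_cases h : (aNts x.2).length ≠ 0 <;> simp [h]

-- B's buckets agree with A's per-distance filter scans
theorem ct_buckets_getD (bs : List (String × Int)) (d : Int) :
    ((bs.foldl (fun d p => d.modify p.2 [] (fun v => v ++ [p.1])) PySem.Dict.empty).getD d [])
      = (bs.filter (fun p => p.2 == d)).map (·.1) := by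
  have h : bs.foldl (fun d p => d.modify p.2 [] (fun v => v ++ [p.1])) PySem.Dict.empty
      = (bs.map (fun p => (p.2, p.1))).foldl (fun d q => d.modify q.1 [] (fun v => v ++ [q.2])) PySem.Dict.empty := by
    rw [List.foldl_map]
  rw [h, PySem.Dict.getD_foldl_modify_append, PySem.Dict.getD_empty, List.filter_map,
    List.map_map]
  simp [Function.comp_def]

-- B's bucket keys are exactly A's set of distances
theorem ct_buckets_keys (bs : List (String × Int)) :
    (bs.foldl (fun d p => d.modify p.2 [] (fun v => v ++ [p.1])) PySem.Dict.empty).keys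
      = PySem.Set.ofList (bs.map (·.2)) := by
  rw [PySem.Dict.keys_foldl_modify_key bs (fun p => p.2) [] (fun _ p v => v ++ [p.1])]
  rfl

-- _by_distance returns A's increasing distances paired with A's per-distance sorted scans
theorem ctByDistance_eq (Bs : List (String × Int)) :
    ctByDistance Bs = (ctDists Bs).map (fun d => (d, ctSF Bs d)) := by
  simp only [ctByDistance, ct_buckets_keys, ct_buckets_getD, ctDists, ctSF]

theorem ctDists_nil_imp (Bs : List (String × Int)) (h : ctDists Bs = []) :
    (PySem.Dict.ofList Bs).items = [] := by
  rw [ctDists, PySem.List.sorted_eq_nil_iff] at h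
  rcases hm : (PySem.Dict.ofList Bs).items.map (·.2) with _ | ⟨a, rest⟩
  · exact List.map_eq_nil_iff.mp hm
  · exfalso
    have : a ∈ PySem.Set.ofList ((PySem.Dict.ofList Bs).items.map (·.2)) :=
      (PySem.Set.mem_ofList _ _).mpr (hm ▸ List.mem_cons_self)
    rw [h] at this
    exact (List.not_mem_nil) this

theorem bTop_eq (Bs : List (String × Int)) :
    (PySem.List.pyGetD (ctByDistance Bs) 0 (0, [])).2 = aTop Bs := by
  rw [ctByDistance_eq, aTop]
  rcases hD : ctDists Bs with _ | ⟨d, rest⟩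
  · have hbs := ctDists_nil_imp Bs hD
    simp [ctSF, hbs, PySem.List.pyGetD, PySem.List.pyIdx?, PySem.List.pyGet?, PySem.List.sorted]
  · simp [PySem.List.pyGetD, PySem.List.pyIdx?, PySem.List.pyGet?]

theorem bZero_eq (Bs : List (String × Int)) :
    ((PySem.List.pyGetD (ctByDistance Bs) 0 (0, [])).1 == 0) = aZero Bs := by
  rw [ctByDistance_eq, aZero]
  rcases hD : ctDists Bs with _ | ⟨d, rest⟩
  · simp [PySem.List.pyGetD, PySem.List.pyIdx?, PySem.List.pyGet?]
  · simp [PySem.List.pyGetD, PySem.List.pyIdx?, PySem.List.pyGet?]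

theorem aNts_eq_map (Bs : List (String × Int)) :
    aNts Bs = ((ctDists Bs).drop 1).map (ctSF Bs) := by
  rw [aNts, PySem.List.foldl_append_singleton_eq_map, PySem.List.slice_from _ (by norm_num)]
  simp

theorem bCond_eq (Bs : List (String × Int)) :
    decide (1 < (ctByDistance Bs).length) = decide ((aNts Bs).length ≠ 0) := by
  rw [ctByDistance_eq, aNts_eq_map]
  simp only [List.length_map, List.length_drop]
  by_cases h : 1 < (ctDists Bs).length
  · simp only [h]; simp; omega
  · simp only [h]; simp; omega

theorem bNts_eq (Bs : List (String × Int)) :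
    (PySem.List.slice (ctByDistance Bs) (some 1) none).map (·.2) = aNts Bs := by
  rw [ctByDistance_eq, aNts_eq_map, PySem.List.slice_from _ (by norm_num)]
  simp only [Int.toNat_one, ← List.map_drop, List.map_map]
  rfl

-- a filtered list of items with distinct keys still has distinct keys
theorem nodup_filter_map_fst {nu : Type} (l : List (String × nu)) (c : String × nu → Bool)
    (h : (l.map Prod.fst).Nodup) : ((l.filter c).map Prod.fst).Nodup :=
  h.sublist (List.filter_sublist.map Prod.fst)

-- repackaging each item keeps the key list, hence its distinctness
theorem nodup_map_fst_pair {nu nu' : Type} (l : List (String × nu)) (f : String × nu → nu')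
    (h : (l.map Prod.fst).Nodup) : ((l.map (fun x => (x.1, f x))).map Prod.fst).Nodup := by
  have he : (l.map (fun x => (x.1, f x))).map Prod.fst = l.map Prod.fst := by
    simp [List.map_map, Function.comp_def]
  rw [he]; exact h

-- items of a dict decoded from a list with distinct keys is that list
theorem items_ofList_nodup {nu : Type} (l : List (String × nu)) (h : (l.map Prod.fst).Nodup) :
    (PySem.Dict.ofList l).items = l := by
  have := PySem.Dict.items_foldl_insert_fresh (l := l) (k := Prod.fst) (v := Prod.snd)
    (d := PySem.Dict.empty) (by simp) h
  simpa using this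

-- ===== VERDICT (by name: the statement is the Claim_ definition above) =====
theorem collect_tophits_py_spec : Claim_equal_collect_tophits_py := by
  intro fh _ _
  unfold Spec_collect_tophits_py collect_tophits_py collect_tophits_py_alt
  have hk : ((PySem.Dict.ofList fh).items.map Prod.fst).Nodup :=
    PySem.Dict.nodup_keys_ofList fh
  obtain ⟨i1, i2, i3⟩ := foldA_spec ((PySem.Dict.ofList fh).items)
    PySem.Dict.empty PySem.Set.empty PySem.Dict.empty hk
    (by intro x _; rfl) (by intro x _ h; exact (List.not_mem_nil) h) (by intro x _; rfl)
  dsimp only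
  rw [i1, i2, i3]
  simp only [Prod.mk.injEq]
  refine ⟨?_, ?_, ?_⟩
  · simp only [List.map_map, Function.comp_def, bTop_eq]
    exact (items_ofList_nodup _ (nodup_map_fst_pair _ _ hk)).symm
  · rw [List.filter_map, List.map_map]
    simp only [Function.comp_def, bZero_eq]
    exact (PySem.Set.ofList_eq_self_of_nodup _ (nodup_filter_map_fst _ _ hk)).symm
  · rw [List.filter_map]
    simp only [List.map_map, Function.comp_def, bNts_eq, bCond_eq]
    exact (items_ofList_nodup _ (nodup_map_fst_pair _ _ (nodup_filter_map_fst _ _ hk))).symm
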